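-- pv_equiv track=rewrite | github.com/borisdc5/Jobradar | fetch.py | ft_normalize_location
-- ===== SOURCE A (Python) =====
-- def ft_normalize_location(lieu):
--     raw = lieu.get('libelle', '')
--     parts = raw.split(' - ', 1)
--     dept = parts[0].strip()
--     city = parts[1].strip().lower() if len(parts) == 2 else raw.lower()
--     if any(x in city for x in ['remote','teletravail','télétravail']): return 'Remote'
--     if dept in ['75','92','93','94','95','77','78','91'] or any(x in city for x in ['paris','boulogne','nanterre','montrouge','issy','cergy']): return 'Paris'
--     if dept == '69' or any(x in city for x in ['lyon','villeurbanne']): return 'Lyon'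
--     if dept == '33' or 'bordeaux' in city: return 'Bordeaux'
--     if dept == '35' or 'rennes' in city: return 'Rennes'
--     if dept == '44' or 'nantes' in city: return 'Nantes'
--     if dept == '34' or 'montpellier' in city: return 'Montpellier'
--     if dept == '31' or 'toulouse' in city: return 'Toulouse'
--     if dept == '59' or any(x in city for x in ['lille','valenciennes']): return 'Lille'
--     if dept == '13' or any(x in city for x in ['marseille','aix']): return 'Marseille'
--     if dept == '67' or 'strasbourg' in city: return 'Strasbourg'
--     if dept == '06' or 'nice' in city: return 'Nice'
--     return parts[1].strip() if len(parts) == 2 else raw.strip()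
-- ===== SOURCE B (Python) =====
-- _LABELS = ['Remote', 'Paris', 'Lyon', 'Bordeaux', 'Rennes', 'Nantes',
--            'Montpellier', 'Toulouse', 'Lille', 'Marseille', 'Strasbourg', 'Nice']
--
-- _DEPT_PRIO = {'75': 1, '92': 1, '93': 1, '94': 1, '95': 1, '77': 1, '78': 1, '91': 1,
--               '69': 2, '33': 3, '35': 4, '44': 5, '34': 6, '31': 7, '59': 8,
--               '13': 9, '67': 10, '06': 11}
--
-- _KW_PRIO = {'remote': 0, 'teletravail': 0, 'télétravail': 0,
--             'paris': 1, 'boulogne': 1, 'nanterre': 1, 'montrouge': 1, 'issy': 1, 'cergy': 1,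
--             'lyon': 2, 'villeurbanne': 2,
--             'bordeaux': 3, 'rennes': 4, 'nantes': 5, 'montpellier': 6, 'toulouse': 7,
--             'lille': 8, 'valenciennes': 8,
--             'marseille': 9, 'aix': 9,
--             'strasbourg': 10, 'nice': 11}
--
--
-- def ft_normalize_location(lieu):
--     raw = lieu.get('libelle', '')
--     parts = raw.split(' - ', 1)
--     dept = parts[0].strip()
--     city = parts[1].strip().lower() if len(parts) == 2 else raw.lower()
--     # argmin over priorities: start with the dept's priority (sentinel = no match),
--     # then lower the running minimum with every keyword found in the city.
--     best = _DEPT_PRIO.get(dept, len(_LABELS))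
--     for kw, p in _KW_PRIO.items():
--         if p < best and kw in city:
--             best = p
--     if best < len(_LABELS):
--         return _LABELS[best]
--     return parts[1].strip() if len(parts) == 2 else raw.strip()
-- ===== Notes on version B (the rewrite author's own statement) =====
-- stated objective: alternative
-- what changed: Replaces A's ordered early-return if-chain by an argmin computation: a dept-to-priority dict and a flat keyword-to-priority dict, one running-minimum fold over all keyword hits seeded with the dept's priority, and a single final label-array lookup.
import Mathlib
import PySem

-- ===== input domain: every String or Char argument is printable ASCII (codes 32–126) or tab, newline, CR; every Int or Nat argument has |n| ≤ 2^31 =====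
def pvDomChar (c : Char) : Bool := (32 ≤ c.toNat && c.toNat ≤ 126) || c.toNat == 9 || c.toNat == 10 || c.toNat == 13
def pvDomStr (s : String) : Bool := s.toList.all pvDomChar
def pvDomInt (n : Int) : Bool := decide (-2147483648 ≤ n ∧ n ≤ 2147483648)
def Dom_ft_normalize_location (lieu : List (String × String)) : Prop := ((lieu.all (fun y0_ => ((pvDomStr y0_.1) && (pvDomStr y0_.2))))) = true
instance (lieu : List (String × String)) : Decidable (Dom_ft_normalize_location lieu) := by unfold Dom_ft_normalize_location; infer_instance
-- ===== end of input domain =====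

-- B replaces A's early-return rule chain by an argmin over priority tables: a dept→priority
-- dict, a flat keyword→priority dict folded with a running minimum, one final label lookup
-- ('alternative'; same cost, no speed claim).

-- ===== PORT A =====
def ft_normalize_location (lieu : List (String × String)) : String :=
  let raw := PySem.Dict.getD (PySem.Dict.ofList lieu) "libelle" ""
  let parts := (PySem.Str.splitMax? raw " - " 1).getD []
  let dept := PySem.Str.strip ((PySem.List.pyGet? parts 0).getD "")
  let city := if parts.length == 2
    then PySem.Str.lower (PySem.Str.strip ((PySem.List.pyGet? parts 1).getD ""))
    else PySem.Str.lower raw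
  if (["remote", "teletravail", "télétravail"] : List String).any (fun x => PySem.Str.isIn x city) then "Remote"
  else if (["75","92","93","94","95","77","78","91"] : List String).contains dept
       || (["paris","boulogne","nanterre","montrouge","issy","cergy"] : List String).any (fun x => PySem.Str.isIn x city) then "Paris"
  else if dept == "69" || (["lyon","villeurbanne"] : List String).any (fun x => PySem.Str.isIn x city) then "Lyon"
  else if dept == "33" || PySem.Str.isIn "bordeaux" city then "Bordeaux"
  else if dept == "35" || PySem.Str.isIn "rennes" city then "Rennes"
  else if dept == "44" || PySem.Str.isIn "nantes" city then "Nantes"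
  else if dept == "34" || PySem.Str.isIn "montpellier" city then "Montpellier"
  else if dept == "31" || PySem.Str.isIn "toulouse" city then "Toulouse"
  else if dept == "59" || (["lille","valenciennes"] : List String).any (fun x => PySem.Str.isIn x city) then "Lille"
  else if dept == "13" || (["marseille","aix"] : List String).any (fun x => PySem.Str.isIn x city) then "Marseille"
  else if dept == "67" || PySem.Str.isIn "strasbourg" city then "Strasbourg"
  else if dept == "06" || PySem.Str.isIn "nice" city then "Nice"
  else if parts.length == 2 then PySem.Str.strip ((PySem.List.pyGet? parts 1).getD "")
  else PySem.Str.strip raw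

-- ===== PORT B =====
-- module-level tables of Source B
def pvLabels : List String :=
  ["Remote","Paris","Lyon","Bordeaux","Rennes","Nantes","Montpellier","Toulouse","Lille","Marseille","Strasbourg","Nice"]

def pvDeptPrio : PySem.Dict String Nat := PySem.Dict.ofList
  [("75",1),("92",1),("93",1),("94",1),("95",1),("77",1),("78",1),("91",1),
   ("69",2),("33",3),("35",4),("44",5),("34",6),("31",7),("59",8),("13",9),("67",10),("06",11)]

def pvKwPrio : List (String × Nat) :=
  [("remote",0),("teletravail",0),("télétravail",0),
   ("paris",1),("boulogne",1),("nanterre",1),("montrouge",1),("issy",1),("cergy",1),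
   ("lyon",2),("villeurbanne",2),("bordeaux",3),("rennes",4),("nantes",5),("montpellier",6),("toulouse",7),
   ("lille",8),("valenciennes",8),("marseille",9),("aix",9),("strasbourg",10),("nice",11)]

def ft_normalize_location_alt (lieu : List (String × String)) : String :=
  let raw := PySem.Dict.getD (PySem.Dict.ofList lieu) "libelle" ""
  let parts := (PySem.Str.splitMax? raw " - " 1).getD []
  let dept := PySem.Str.strip ((PySem.List.pyGet? parts 0).getD "")
  let city := if parts.length == 2
    then PySem.Str.lower (PySem.Str.strip ((PySem.List.pyGet? parts 1).getD ""))
    else PySem.Str.lower raw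
  -- running-minimum fold over the keyword→priority items, started at the dept's priority
  let best := pvKwPrio.foldl
    (fun b kp => if kp.2 < b ∧ PySem.Str.isIn kp.1 city = true then kp.2 else b)
    (PySem.Dict.getD pvDeptPrio dept pvLabels.length)
  if best < pvLabels.length then (PySem.List.pyGet? pvLabels (best : Int)).getD ""
  else if parts.length == 2 then PySem.Str.strip ((PySem.List.pyGet? parts 1).getD "")
  else PySem.Str.strip raw

-- ===== PRECONDITION & SPEC =====
def Spec_ft_normalize_location (lieu : List (String × String)) (out : String) : Prop := out = ft_normalize_location_alt lieu
instance (lieu : List (String × String)) (out : String) : Decidable (Spec_ft_normalize_location lieu out) := by unfold Spec_ft_normalize_location; infer_instance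

-- ===== CLAIM (what is proved, stated in full; the proofs are below) =====
def Claim_equal_ft_normalize_location : Prop := ∀ (lieu : List (String × String)), Dom_ft_normalize_location lieu → Spec_ft_normalize_location lieu (ft_normalize_location lieu)

-- ===== LEMMAS AND PROOFS =====

-- the keyword groups of rule 0..11 (proof-side view of pvKwPrio)
def pvGroups : List (List String) :=
  [["remote","teletravail","télétravail"],
   ["paris","boulogne","nanterre","montrouge","issy","cergy"],
   ["lyon","villeurbanne"],["bordeaux"],["rennes"],["nantes"],["montpellier"],["toulouse"],
   ["lille","valenciennes"],["marseille","aix"],["strasbourg"],["nice"]]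

-- first rule index ≥ n that matches (dept index b0 hit exactly, or a keyword of the group), else b0
def pvChain (f : String → Bool) : Nat → Nat → List (List String) → Nat
  | _, b0, [] => b0
  | n, b0, g :: gs => if n = b0 ∨ g.any f = true then n else pvChain f (n+1) b0 gs

-- running minimum over the groups, group n contributing n when some keyword matches
def pvBest (f : String → Bool) : Nat → Nat → List (List String) → Nat
  | _, acc, [] => acc
  | n, acc, g :: gs => pvBest f (n+1) (if n < acc ∧ g.any f = true then n else acc) gs

-- the flat (keyword, priority) list of group list gs with priorities starting at n
def pvEncode : Nat → List (List String) → List (String × Nat)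
  | _, [] => []
  | n, g :: gs => g.map (fun kw => (kw, n)) ++ pvEncode (n+1) gs

theorem pvKw_encode : pvKwPrio = pvEncode 0 pvGroups := by decide

theorem pvBest_frozen (f : String → Bool) :
    ∀ (gs : List (List String)) (n acc : Nat), acc < n → pvBest f n acc gs = acc := by
  intro gs
  induction gs with
  | nil => intro n acc h; rfl
  | cons g gs ih =>
      intro n acc h
      have hif : (if n < acc ∧ g.any f = true then n else acc) = acc :=
        if_neg (fun hc => absurd hc.1 (by omega))
      simp only [pvBest, hif]
      exact ih (n+1) acc (by omega)

theorem pvChain_eq_pvBest (f : String → Bool) :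
    ∀ (gs : List (List String)) (n b0 : Nat), n ≤ b0 →
      pvChain f n b0 gs = pvBest f n b0 gs := by
  intro gs
  induction gs with
  | nil => intro n b0 h; rfl
  | cons g gs ih =>
      intro n b0 h
      by_cases hb : n = b0
      · subst hb
        have hA : pvChain f n n (g :: gs) = n := by simp [pvChain]
        have hB : pvBest f n n (g :: gs) = n := by
          have hif : (if n < n ∧ g.any f = true then n else n) = n := by split <;> rfl
          simp only [pvBest, hif]
          exact pvBest_frozen f gs (n+1) n (by omega)
        rw [hA, hB]
      · by_cases hg : g.any f = true
        · have hA : pvChain f n b0 (g :: gs) = n := by simp [pvChain, hg]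
          have hB : pvBest f n b0 (g :: gs) = n := by
            have hif : (if n < b0 ∧ g.any f = true then n else b0) = n :=
              if_pos ⟨by omega, hg⟩
            simp only [pvBest, hif]
            exact pvBest_frozen f gs (n+1) n (by omega)
          rw [hA, hB]
        · have hif : (if n < b0 ∧ g.any f = true then n else b0) = b0 :=
            if_neg (fun hc => absurd hc.2 hg)
          have hcond : ¬ (n = b0 ∨ g.any f = true) := by
            intro hc; rcases hc with hc | hc; exact hb hc; exact hg hc
          simp only [pvChain, pvBest, hif, if_neg hcond]
          exact ih (n+1) b0 (by omega)

theorem pvGroupFold (f : String → Bool) (n : Nat) :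
    ∀ (g : List String) (acc : Nat),
      g.foldl (fun b kw => if n < b ∧ f kw = true then n else b) acc
        = if n < acc ∧ g.any f = true then n else acc := by
  intro g
  induction g with
  | nil => intro acc; simp
  | cons kw g ih =>
      intro acc
      by_cases hf : f kw = true
      · by_cases ha : n < acc
        · simp only [List.foldl_cons, ih, List.any_cons, hf]
          simp [ha]
        · have hif : (if n < acc ∧ f kw = true then n else acc) = acc :=
            if_neg (fun hc => absurd hc.1 ha)
          simp only [List.foldl_cons, hif, ih, List.any_cons]
          simp [ha]
      · have hf' : f kw = false := by revert hf; cases f kw <;> simp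
        simp only [List.foldl_cons, ih, List.any_cons, hf']
        simp

theorem pvEncodeFold (f : String → Bool) :
    ∀ (gs : List (List String)) (n acc : Nat),
      (pvEncode n gs).foldl (fun b kp => if kp.2 < b ∧ f kp.1 = true then kp.2 else b) acc
        = pvBest f n acc gs := by
  intro gs
  induction gs with
  | nil => intro n acc; rfl
  | cons g gs ih =>
      intro n acc
      simp only [pvEncode, List.foldl_append, List.foldl_map, pvBest]
      rw [pvGroupFold f n g acc, ih]

-- Source B's fold over the flat keyword table, as a per-group running minimum
theorem pvFoldBest (city : String) (acc : Nat) :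
    pvKwPrio.foldl (fun b kp => if kp.2 < b ∧ PySem.Str.isIn kp.1 city = true then kp.2 else b) acc
      = pvBest (fun kw => PySem.Str.isIn kw city) 0 acc pvGroups := by
  rw [pvKw_encode]
  exact pvEncodeFold (fun kw => PySem.Str.isIn kw city) pvGroups 0 acc

-- label of rule m, fb when m = 12 (no rule matched)
def pvLabelAt (m : Nat) (fb : String) : String :=
  if m < pvLabels.length then (PySem.List.pyGet? pvLabels (m : Int)).getD "" else fb

theorem pvLabelAt_0 (fb : String) : pvLabelAt 0 fb = "Remote" := by
  simp only [pvLabelAt, pvLabels]; norm_num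
theorem pvLabelAt_1 (fb : String) : pvLabelAt 1 fb = "Paris" := by
  simp only [pvLabelAt, pvLabels]; norm_num
theorem pvLabelAt_2 (fb : String) : pvLabelAt 2 fb = "Lyon" := by
  simp only [pvLabelAt, pvLabels]; norm_num; decide
theorem pvLabelAt_3 (fb : String) : pvLabelAt 3 fb = "Bordeaux" := by
  simp only [pvLabelAt, pvLabels]; norm_num; decide
theorem pvLabelAt_4 (fb : String) : pvLabelAt 4 fb = "Rennes" := by
  simp only [pvLabelAt, pvLabels]; norm_num; decide
theorem pvLabelAt_5 (fb : String) : pvLabelAt 5 fb = "Nantes" := by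
  simp only [pvLabelAt, pvLabels]; norm_num; decide
theorem pvLabelAt_6 (fb : String) : pvLabelAt 6 fb = "Montpellier" := by
  simp only [pvLabelAt, pvLabels]; norm_num; decide
theorem pvLabelAt_7 (fb : String) : pvLabelAt 7 fb = "Toulouse" := by
  simp only [pvLabelAt, pvLabels]; norm_num; decide
theorem pvLabelAt_8 (fb : String) : pvLabelAt 8 fb = "Lille" := by
  simp only [pvLabelAt, pvLabels]; norm_num; decide
theorem pvLabelAt_9 (fb : String) : pvLabelAt 9 fb = "Marseille" := by
  simp only [pvLabelAt, pvLabels]; norm_num; decide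
theorem pvLabelAt_10 (fb : String) : pvLabelAt 10 fb = "Strasbourg" := by
  simp only [pvLabelAt, pvLabels]; norm_num; decide
theorem pvLabelAt_11 (fb : String) : pvLabelAt 11 fb = "Nice" := by
  simp only [pvLabelAt, pvLabels]; norm_num; decide
theorem pvLabelAt_12 (fb : String) : pvLabelAt 12 fb = fb := by
  simp [pvLabelAt, pvLabels]

-- A's chain over labelled groups (A-side view)
def pvSChain (f : String → Bool) (fb : String) : Nat → Nat → List (List String × String) → String
  | _, _, [] => fb
  | n, d0, (g, lab) :: gs => if n = d0 ∨ g.any f = true then lab else pvSChain f fb (n+1) d0 gs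

theorem pvSChain_eq (f : String → Bool) (fb : String) :
    ∀ (gs : List (List String × String)) (n d0 : Nat), n ≤ d0 → d0 ≤ 12 → n + gs.length = 12 →
      (∀ k (hk : k < gs.length), (gs[k]).2 = pvLabelAt (n + k) fb) →
      pvSChain f fb n d0 gs = pvLabelAt (pvChain f n d0 (gs.map (·.1))) fb := by
  intro gs
  induction gs with
  | nil =>
      intro n d0 h1 h2 h3 _
      have hd : d0 = 12 := by simp at h3; omega
      subst hd
      simp [pvSChain, pvChain, pvLabelAt_12]
  | cons p gs ih =>
      intro n d0 h1 h2 h3 hlab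
      obtain ⟨g, lab⟩ := p
      simp only [pvSChain, List.map_cons, pvChain]
      by_cases hc : n = d0 ∨ g.any f = true
      · rw [if_pos hc, if_pos hc]
        have := hlab 0 (by simp)
        simpa using this
      · rw [if_neg hc, if_neg hc]
        have hne : n ≠ d0 := fun hh => hc (Or.inl hh)
        apply ih (n+1) d0 (by omega) h2 (by simp at h3 ⊢; omega)
        intro k hk
        have := hlab (k+1) (by simp at hk ⊢; omega)
        simpa [Nat.add_assoc, Nat.add_comm 1 k] using this

-- the labelled groups
def pvZip : List (List String × String) :=
  [(["remote","teletravail","télétravail"], "Remote"),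
   (["paris","boulogne","nanterre","montrouge","issy","cergy"], "Paris"),
   (["lyon","villeurbanne"], "Lyon"), (["bordeaux"], "Bordeaux"),
   (["rennes"], "Rennes"), (["nantes"], "Nantes"), (["montpellier"], "Montpellier"),
   (["toulouse"], "Toulouse"), (["lille","valenciennes"], "Lille"),
   (["marseille","aix"], "Marseille"), (["strasbourg"], "Strasbourg"), (["nice"], "Nice")]

theorem pvChainRender (f : String → Bool) (fb : String) (d0 : Nat) (hd0 : d0 ≤ 12) :
    pvSChain f fb 0 d0 pvZip = pvLabelAt (pvBest f 0 d0 pvGroups) fb := by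
  rw [← pvChain_eq_pvBest f pvGroups 0 d0 (Nat.zero_le _)]
  have hmap : pvZip.map (·.1) = pvGroups := by decide
  rw [← hmap]
  apply pvSChain_eq f fb pvZip 0 d0 (Nat.zero_le _) hd0 (by decide)
  intro k hk
  have hk' : k < 12 := by simpa [pvZip] using hk
  interval_cases k <;>
    simp [pvZip, pvLabelAt_0, pvLabelAt_1, pvLabelAt_2, pvLabelAt_3, pvLabelAt_4, pvLabelAt_5,
      pvLabelAt_6, pvLabelAt_7, pvLabelAt_8, pvLabelAt_9, pvLabelAt_10, pvLabelAt_11]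

-- A's if-chain, dept tests abstracted as per-rule booleans
def pvAOf (dept : String) : List (Bool × List String × String) :=
  [(false, ["remote","teletravail","télétravail"], "Remote"),
   ((["75","92","93","94","95","77","78","91"] : List String).contains dept,
      ["paris","boulogne","nanterre","montrouge","issy","cergy"], "Paris"),
   (dept == "69", ["lyon","villeurbanne"], "Lyon"),
   (dept == "33", ["bordeaux"], "Bordeaux"),
   (dept == "35", ["rennes"], "Rennes"),
   (dept == "44", ["nantes"], "Nantes"),
   (dept == "34", ["montpellier"], "Montpellier"),
   (dept == "31", ["toulouse"], "Toulouse"),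
   (dept == "59", ["lille","valenciennes"], "Lille"),
   (dept == "13", ["marseille","aix"], "Marseille"),
   (dept == "67", ["strasbourg"], "Strasbourg"),
   (dept == "06", ["nice"], "Nice")]

def pvAChain (f : String → Bool) (fb : String) : List (Bool × List String × String) → String
  | [] => fb
  | (b, g, lab) :: gs => if b || g.any f then lab else pvAChain f fb gs

theorem pvAChain_eq_pvSChain (f : String → Bool) (fb : String) :
    ∀ (gs : List (Bool × List String × String)) (n d0 : Nat),
      (∀ k (hk : k < gs.length), (gs[k]).1 = decide (n + k = d0)) →
      pvAChain f fb gs = pvSChain f fb n d0 (gs.map (fun t => (t.2.1, t.2.2))) := by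
  intro gs
  induction gs with
  | nil => intro n d0 _; rfl
  | cons t gs ih =>
      intro n d0 hb
      obtain ⟨b, g, lab⟩ := t
      have hb0 : b = decide (n = d0) := by simpa using hb 0 (by simp)
      subst hb0
      simp only [pvAChain, pvSChain, List.map_cons]
      by_cases hnd : n = d0
      · simp [hnd]
      · have hd : decide (n = d0) = false := by simp [hnd]
        rw [hd, Bool.false_or]
        by_cases hany : g.any f = true
        · simp [hany]
        · have hbf : g.any f = false := by
            revert hany; cases g.any f <;> simp
          rw [hbf]
          rw [if_neg (by simp : ¬ ((false : Bool) = true)),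
              if_neg (by simp [hnd] : ¬ (n = d0 ∨ (false : Bool) = true))]
          apply ih
          intro k hk
          have := hb (k+1) (by simp at hk ⊢; omega)
          simpa [Nat.add_assoc, Nat.add_comm 1 k] using this

theorem pvLetRender (X : Nat) (fb : String) :
    (let best := X
     if best < pvLabels.length then (PySem.List.pyGet? pvLabels (best : Int)).getD "" else fb)
      = pvLabelAt X fb := rfl

set_option maxHeartbeats 1000000 in
theorem pvBody_eq (dept city fb : String) :
    (if (["remote", "teletravail", "télétravail"] : List String).any (fun x => PySem.Str.isIn x city) then "Remote"
  else if (["75","92","93","94","95","77","78","91"] : List String).contains dept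
       || (["paris","boulogne","nanterre","montrouge","issy","cergy"] : List String).any (fun x => PySem.Str.isIn x city) then "Paris"
  else if dept == "69" || (["lyon","villeurbanne"] : List String).any (fun x => PySem.Str.isIn x city) then "Lyon"
  else if dept == "33" || PySem.Str.isIn "bordeaux" city then "Bordeaux"
  else if dept == "35" || PySem.Str.isIn "rennes" city then "Rennes"
  else if dept == "44" || PySem.Str.isIn "nantes" city then "Nantes"
  else if dept == "34" || PySem.Str.isIn "montpellier" city then "Montpellier"
  else if dept == "31" || PySem.Str.isIn "toulouse" city then "Toulouse"
  else if dept == "59" || (["lille","valenciennes"] : List String).any (fun x => PySem.Str.isIn x city) then "Lille"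
  else if dept == "13" || (["marseille","aix"] : List String).any (fun x => PySem.Str.isIn x city) then "Marseille"
  else if dept == "67" || PySem.Str.isIn "strasbourg" city then "Strasbourg"
  else if dept == "06" || PySem.Str.isIn "nice" city then "Nice"
  else fb)
  = (let best := pvKwPrio.foldl
        (fun b kp => if kp.2 < b ∧ PySem.Str.isIn kp.1 city = true then kp.2 else b)
        (PySem.Dict.getD pvDeptPrio dept pvLabels.length)
     if best < pvLabels.length then (PySem.List.pyGet? pvLabels (best : Int)).getD "" else fb) := by
  rw [pvLetRender, pvFoldBest]
  suffices h : pvAChain (fun x => PySem.Str.isIn x city) fb (pvAOf dept)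
      = pvLabelAt (pvBest (fun kw => PySem.Str.isIn kw city) 0
          (PySem.Dict.getD pvDeptPrio dept pvLabels.length) pvGroups) fb by
    simpa only [pvAChain, pvAOf, Bool.false_or, List.any_cons, List.any_nil, Bool.or_false] using h
  by_cases h1 : dept = "75"
  · subst h1
    rw [show PySem.Dict.getD pvDeptPrio "75" pvLabels.length = 1 from by decide]
    rw [pvAChain_eq_pvSChain (fun x => PySem.Str.isIn x city) fb (pvAOf "75") 0 1 (by decide)]
    rw [show (pvAOf "75").map (fun t => (t.2.1, t.2.2)) = pvZip from by decide]
    exact pvChainRender _ fb 1 (by omega)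
  by_cases h2 : dept = "92"
  · subst h2
    rw [show PySem.Dict.getD pvDeptPrio "92" pvLabels.length = 1 from by decide]
    rw [pvAChain_eq_pvSChain (fun x => PySem.Str.isIn x city) fb (pvAOf "92") 0 1 (by decide)]
    rw [show (pvAOf "92").map (fun t => (t.2.1, t.2.2)) = pvZip from by decide]
    exact pvChainRender _ fb 1 (by omega)
  by_cases h3 : dept = "93"
  · subst h3
    rw [show PySem.Dict.getD pvDeptPrio "93" pvLabels.length = 1 from by decide]
    rw [pvAChain_eq_pvSChain (fun x => PySem.Str.isIn x city) fb (pvAOf "93") 0 1 (by decide)]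
    rw [show (pvAOf "93").map (fun t => (t.2.1, t.2.2)) = pvZip from by decide]
    exact pvChainRender _ fb 1 (by omega)
  by_cases h4 : dept = "94"
  · subst h4
    rw [show PySem.Dict.getD pvDeptPrio "94" pvLabels.length = 1 from by decide]
    rw [pvAChain_eq_pvSChain (fun x => PySem.Str.isIn x city) fb (pvAOf "94") 0 1 (by decide)]
    rw [show (pvAOf "94").map (fun t => (t.2.1, t.2.2)) = pvZip from by decide]
    exact pvChainRender _ fb 1 (by omega)
  by_cases h5 : dept = "95"
  · subst h5
    rw [show PySem.Dict.getD pvDeptPrio "95" pvLabels.length = 1 from by decide]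
    rw [pvAChain_eq_pvSChain (fun x => PySem.Str.isIn x city) fb (pvAOf "95") 0 1 (by decide)]
    rw [show (pvAOf "95").map (fun t => (t.2.1, t.2.2)) = pvZip from by decide]
    exact pvChainRender _ fb 1 (by omega)
  by_cases h6 : dept = "77"
  · subst h6
    rw [show PySem.Dict.getD pvDeptPrio "77" pvLabels.length = 1 from by decide]
    rw [pvAChain_eq_pvSChain (fun x => PySem.Str.isIn x city) fb (pvAOf "77") 0 1 (by decide)]
    rw [show (pvAOf "77").map (fun t => (t.2.1, t.2.2)) = pvZip from by decide]
    exact pvChainRender _ fb 1 (by omega)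
  by_cases h7 : dept = "78"
  · subst h7
    rw [show PySem.Dict.getD pvDeptPrio "78" pvLabels.length = 1 from by decide]
    rw [pvAChain_eq_pvSChain (fun x => PySem.Str.isIn x city) fb (pvAOf "78") 0 1 (by decide)]
    rw [show (pvAOf "78").map (fun t => (t.2.1, t.2.2)) = pvZip from by decide]
    exact pvChainRender _ fb 1 (by omega)
  by_cases h8 : dept = "91"
  · subst h8
    rw [show PySem.Dict.getD pvDeptPrio "91" pvLabels.length = 1 from by decide]
    rw [pvAChain_eq_pvSChain (fun x => PySem.Str.isIn x city) fb (pvAOf "91") 0 1 (by decide)]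
    rw [show (pvAOf "91").map (fun t => (t.2.1, t.2.2)) = pvZip from by decide]
    exact pvChainRender _ fb 1 (by omega)
  by_cases h9 : dept = "69"
  · subst h9
    rw [show PySem.Dict.getD pvDeptPrio "69" pvLabels.length = 2 from by decide]
    rw [pvAChain_eq_pvSChain (fun x => PySem.Str.isIn x city) fb (pvAOf "69") 0 2 (by decide)]
    rw [show (pvAOf "69").map (fun t => (t.2.1, t.2.2)) = pvZip from by decide]
    exact pvChainRender _ fb 2 (by omega)
  by_cases h10 : dept = "33"
  · subst h10
    rw [show PySem.Dict.getD pvDeptPrio "33" pvLabels.length = 3 from by decide]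
    rw [pvAChain_eq_pvSChain (fun x => PySem.Str.isIn x city) fb (pvAOf "33") 0 3 (by decide)]
    rw [show (pvAOf "33").map (fun t => (t.2.1, t.2.2)) = pvZip from by decide]
    exact pvChainRender _ fb 3 (by omega)
  by_cases h11 : dept = "35"
  · subst h11
    rw [show PySem.Dict.getD pvDeptPrio "35" pvLabels.length = 4 from by decide]
    rw [pvAChain_eq_pvSChain (fun x => PySem.Str.isIn x city) fb (pvAOf "35") 0 4 (by decide)]
    rw [show (pvAOf "35").map (fun t => (t.2.1, t.2.2)) = pvZip from by decide]
    exact pvChainRender _ fb 4 (by omega)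
  by_cases h12 : dept = "44"
  · subst h12
    rw [show PySem.Dict.getD pvDeptPrio "44" pvLabels.length = 5 from by decide]
    rw [pvAChain_eq_pvSChain (fun x => PySem.Str.isIn x city) fb (pvAOf "44") 0 5 (by decide)]
    rw [show (pvAOf "44").map (fun t => (t.2.1, t.2.2)) = pvZip from by decide]
    exact pvChainRender _ fb 5 (by omega)
  by_cases h13 : dept = "34"
  · subst h13
    rw [show PySem.Dict.getD pvDeptPrio "34" pvLabels.length = 6 from by decide]
    rw [pvAChain_eq_pvSChain (fun x => PySem.Str.isIn x city) fb (pvAOf "34") 0 6 (by decide)]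
    rw [show (pvAOf "34").map (fun t => (t.2.1, t.2.2)) = pvZip from by decide]
    exact pvChainRender _ fb 6 (by omega)
  by_cases h14 : dept = "31"
  · subst h14
    rw [show PySem.Dict.getD pvDeptPrio "31" pvLabels.length = 7 from by decide]
    rw [pvAChain_eq_pvSChain (fun x => PySem.Str.isIn x city) fb (pvAOf "31") 0 7 (by decide)]
    rw [show (pvAOf "31").map (fun t => (t.2.1, t.2.2)) = pvZip from by decide]
    exact pvChainRender _ fb 7 (by omega)
  by_cases h15 : dept = "59"
  · subst h15
    rw [show PySem.Dict.getD pvDeptPrio "59" pvLabels.length = 8 from by decide]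
    rw [pvAChain_eq_pvSChain (fun x => PySem.Str.isIn x city) fb (pvAOf "59") 0 8 (by decide)]
    rw [show (pvAOf "59").map (fun t => (t.2.1, t.2.2)) = pvZip from by decide]
    exact pvChainRender _ fb 8 (by omega)
  by_cases h16 : dept = "13"
  · subst h16
    rw [show PySem.Dict.getD pvDeptPrio "13" pvLabels.length = 9 from by decide]
    rw [pvAChain_eq_pvSChain (fun x => PySem.Str.isIn x city) fb (pvAOf "13") 0 9 (by decide)]
    rw [show (pvAOf "13").map (fun t => (t.2.1, t.2.2)) = pvZip from by decide]
    exact pvChainRender _ fb 9 (by omega)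
  by_cases h17 : dept = "67"
  · subst h17
    rw [show PySem.Dict.getD pvDeptPrio "67" pvLabels.length = 10 from by decide]
    rw [pvAChain_eq_pvSChain (fun x => PySem.Str.isIn x city) fb (pvAOf "67") 0 10 (by decide)]
    rw [show (pvAOf "67").map (fun t => (t.2.1, t.2.2)) = pvZip from by decide]
    exact pvChainRender _ fb 10 (by omega)
  by_cases h18 : dept = "06"
  · subst h18
    rw [show PySem.Dict.getD pvDeptPrio "06" pvLabels.length = 11 from by decide]
    rw [pvAChain_eq_pvSChain (fun x => PySem.Str.isIn x city) fb (pvAOf "06") 0 11 (by decide)]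
    rw [show (pvAOf "06").map (fun t => (t.2.1, t.2.2)) = pvZip from by decide]
    exact pvChainRender _ fb 11 (by omega)
  -- dept matches no department code: its priority is the sentinel 12
  have hmk : pvDeptPrio = PySem.Dict.mk
      [("75",1),("92",1),("93",1),("94",1),("95",1),("77",1),("78",1),("91",1),
       ("69",2),("33",3),("35",4),("44",5),("34",6),("31",7),("59",8),("13",9),("67",10),("06",11)] := by
    decide
  have hnc : pvDeptPrio.contains dept = false := by
    rw [hmk]
    simp
    exact ⟨fun h => h1 h.symm, fun h => h2 h.symm, fun h => h3 h.symm, fun h => h4 h.symm,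
      fun h => h5 h.symm, fun h => h6 h.symm, fun h => h7 h.symm, fun h => h8 h.symm,
      fun h => h9 h.symm, fun h => h10 h.symm, fun h => h11 h.symm, fun h => h12 h.symm,
      fun h => h13 h.symm, fun h => h14 h.symm, fun h => h15 h.symm, fun h => h16 h.symm,
      fun h => h17 h.symm, fun h => h18 h.symm⟩
  have hg : PySem.Dict.getD pvDeptPrio dept pvLabels.length = 12 :=
    (PySem.Dict.getD_of_not_contains pvDeptPrio pvLabels.length hnc).trans (by decide)
  rw [hg]
  rw [pvAChain_eq_pvSChain (fun x => PySem.Str.isIn x city) fb (pvAOf dept) 0 12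
        (by
          intro k hk
          have hk' : k < 12 := by simpa [pvAOf] using hk
          interval_cases k <;> simp [pvAOf, h1, h2, h3, h4, h5, h6, h7, h8, h9, h10, h11, h12, h13, h14, h15, h16, h17, h18])]
  rw [show (pvAOf dept).map (fun t => (t.2.1, t.2.2)) = pvZip from by simp [pvAOf, pvZip]]
  exact pvChainRender _ fb 12 (by omega)

-- ===== VERDICT (by name: the statement is the Claim_ definition above) =====
theorem ft_normalize_location_spec : Claim_equal_ft_normalize_location := by
  intro lieu _
  unfold Spec_ft_normalize_location ft_normalize_location ft_normalize_location_alt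
  exact pvBody_eq _ _ _
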